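-- pv_equiv track=rewrite | github.com/jiwon3401/coding_study | 프로그래머스/unrated/181893. 배열 조각하기/배열 조각하기.py | solution
-- ===== SOURCE A (Python) =====
-- def solution(arr, query):
--     answer=arr.copy()
--     for i in range(len(query)):
--         if i%2==0:
--             tmp = answer[:query[i]+1]
--         else:
--             tmp = answer[query[i]:]
--         answer = tmp
--
--     return answer
-- ===== SOURCE B (Python) =====
-- def solution(arr, query):
--     # Track the surviving window [lo, hi) of the original array; slice once at the end.
--     lo, hi = 0, len(arr)
--     for i in range(len(query)):
--         n = hi - lo
--         if i % 2 == 0: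
--             stop = query[i] + 1
--             if stop < 0:
--                 stop += n
--             stop = max(0, min(n, stop))
--             hi = lo + stop
--         else:
--             start = query[i]
--             if start < 0:
--                 start += n
--             start = max(0, min(n, start))
--             lo = lo + start
--     return arr[lo:hi]
-- ===== Notes on version B (the rewrite author's own statement) =====
-- stated objective: alternative
-- what changed: Instead of materialising a new list at every query, B tracks only the left/right bounds of the surviving window with Python's slice-clamping arithmetic and performs a single slice at the end.
import Mathlib
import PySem

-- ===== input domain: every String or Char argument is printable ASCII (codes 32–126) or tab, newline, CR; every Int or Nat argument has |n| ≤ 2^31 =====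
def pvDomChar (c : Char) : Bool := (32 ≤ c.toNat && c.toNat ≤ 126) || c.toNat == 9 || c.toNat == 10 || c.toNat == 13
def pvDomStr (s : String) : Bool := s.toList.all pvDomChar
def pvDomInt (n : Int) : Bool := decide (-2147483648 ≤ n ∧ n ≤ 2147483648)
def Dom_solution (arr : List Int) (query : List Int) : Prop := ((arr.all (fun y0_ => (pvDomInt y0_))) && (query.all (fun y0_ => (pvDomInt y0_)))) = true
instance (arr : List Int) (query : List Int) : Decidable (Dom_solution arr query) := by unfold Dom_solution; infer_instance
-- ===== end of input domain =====

-- B replaces A's per-query list re-slicing by arithmetic on the surviving window bounds, slicing once at the end (alternative algorithm).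


-- ===== PORT A =====
-- loop body of A: answer = answer[:query[i]+1] (even i) / answer[query[i]:] (odd i)
def solStepA (answer : List Int) (p : Int × Int) : List Int :=
  if PySem.Int.mod p.1 2 == 0 then PySem.List.slice answer none (some (p.2 + 1))
  else PySem.List.slice answer (some p.2) none

def solution (arr : List Int) (query : List Int) : List Int :=
  (PySem.List.enumerate query 0).foldl solStepA arr

-- ===== PORT B =====
-- loop body of B: update the (lo, hi) window bounds with Python's slice clamping
def solStepB (st : Int × Int) (p : Int × Int) : Int × Int :=
  let n := st.2 - st.1
  if PySem.Int.mod p.1 2 == 0 then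
    let stop := p.2 + 1
    let stop := if stop < 0 then stop + n else stop
    let stop := max 0 (min n stop)
    (st.1, st.1 + stop)
  else
    let start := p.2
    let start := if start < 0 then start + n else start
    let start := max 0 (min n start)
    (st.1 + start, st.2)

def solution_alt (arr : List Int) (query : List Int) : List Int :=
  let st := (PySem.List.enumerate query 0).foldl solStepB (0, PySem.List.len arr)
  PySem.List.slice arr (some st.1) (some st.2)

-- ===== PRECONDITION & SPEC =====
def Spec_solution (arr : List Int) (query : List Int) (out : List Int) : Prop := out = solution_alt arr query
instance (arr : List Int) (query : List Int) (out : List Int) : Decidable (Spec_solution arr query out) := by unfold Spec_solution; infer_instance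

-- ===== CLAIM (what is proved, stated in full; the proofs are below) =====
def Claim_equal_solution : Prop := ∀ (arr : List Int) (query : List Int), Dom_solution arr query → Spec_solution arr query (solution arr query)

-- ===== LEMMAS AND PROOFS =====
-- B's clamp arithmetic equals PySem's slice-index clamping.
lemma clamp_arith (m : Nat) (b : Int) :
    max 0 (min (m : Int) (if b < 0 then b + m else b)) = (PySem.List.clampIdx m b : Int) := by
  simp [PySem.List.clampIdx]
  split_ifs <;> omega

-- Invariant: A's current answer is the window [lo, hi) of arr tracked by B's bounds.
lemma window_inv : ∀ (q : List Int) (s : Int) (arr : List Int) (lo hi : Nat),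
    lo ≤ hi → hi ≤ arr.length →
    ∃ lo' hi' : Nat, lo' ≤ hi' ∧ hi' ≤ arr.length ∧
      (PySem.List.enumerate q s).foldl solStepB ((lo : Int), (hi : Int)) = ((lo' : Int), (hi' : Int)) ∧
      (PySem.List.enumerate q s).foldl solStepA ((arr.drop lo).take (hi - lo)) = (arr.drop lo').take (hi' - lo') := by
  intro q
  induction q with
  | nil => intro s arr lo hi h1 h2; exact ⟨lo, hi, h1, h2, rfl, rfl⟩
  | cons v q ih =>
    intro s arr lo hi h1 h2
    rw [PySem.List.enumerate_cons]
    simp only [List.foldl_cons]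
    have hlen : ((arr.drop lo).take (hi - lo)).length = hi - lo := by
      simp [List.length_take, List.length_drop]; omega
    have hcast : (hi : Int) - (lo : Int) = ((hi - lo : Nat) : Int) := by omega
    by_cases hp : PySem.Int.mod s 2 = 0
    · -- even step: answer = answer[:v+1]
      set k := PySem.List.clampIdx (hi - lo) (v + 1) with hk
      have hkle : k ≤ hi - lo := PySem.List.clampIdx_le _ _
      have hB : solStepB ((lo : Int), (hi : Int)) (s, v) = ((lo : Int), ((lo + k : Nat) : Int)) := by
        have := clamp_arith (hi - lo) (v + 1)
        simp only [solStepB, hp, beq_self_eq_true, if_true, hcast, Prod.mk.injEq]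
        refine ⟨trivial, ?_⟩
        rw [this]; omega
      have hA : solStepA ((arr.drop lo).take (hi - lo)) (s, v)
          = (arr.drop lo).take ((lo + k) - lo) := by
        simp only [solStepA, hp, beq_self_eq_true, if_true, PySem.List.slice, hlen, ← hk]
        simp [List.take_take]
        omega
      rw [hB, hA]
      exact ih (s + 1) arr lo (lo + k) (by omega) (by omega)
    · -- odd step: answer = answer[v:]
      have hpf : (PySem.Int.mod s 2 == 0) = false := by simpa using hp
      set t := PySem.List.clampIdx (hi - lo) v with ht
      have htle : t ≤ hi - lo := PySem.List.clampIdx_le _ _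
      have hB : solStepB ((lo : Int), (hi : Int)) (s, v) = (((lo + t : Nat) : Int), (hi : Int)) := by
        have := clamp_arith (hi - lo) v
        simp only [solStepB, hpf, Bool.false_eq_true, if_false, hcast, Prod.mk.injEq]
        refine ⟨?_, trivial⟩
        rw [this]; omega
      have hA : solStepA ((arr.drop lo).take (hi - lo)) (s, v)
          = (arr.drop (lo + t)).take (hi - (lo + t)) := by
        simp only [solStepA, hpf, Bool.false_eq_true, if_false, PySem.List.slice, hlen, ← ht]
        rw [List.drop_take, List.drop_drop, List.take_take]
        congr 1
        omega
      rw [hB, hA]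
      exact ih (s + 1) arr (lo + t) hi (by omega) h2
  
-- ===== VERDICT (by name: the statement is the Claim_ definition above) =====
theorem solution_spec : Claim_equal_solution := by
  intro arr query _
  unfold Spec_solution solution solution_alt
  obtain ⟨lo', hi', h1, h2, hB, hA⟩ :=
    window_inv query 0 arr 0 arr.length (Nat.zero_le _) (le_refl _)
  simp only [PySem.List.len_eq]
  simp only [Nat.cast_zero] at hB
  rw [hB]
  rw [show ((arr.drop 0).take (arr.length - 0)) = arr by simp] at hA
  rw [hA, PySem.List.slice_natCast]
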